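-- pv_equiv track=rewrite | github.com/caleblevy/DigitalLab | Week3_Filter/RoachNum.py | Hex_Dict
-- ===== SOURCE A (Python) =====
-- def Hex_Dict(List):
-- 	List = List[:]
-- 	assert len(List) < 5
-- 	List.reverse()
-- 	while len(List) < 4:
-- 		List.append(0)
--
-- 	List.reverse()
-- 	Hex_num = 8*List[0] + 4*List[1] + 2*List[2] + 1*List[3]
--
-- 	if Hex_num == 10:
-- 		Hex_num = 'a'
-- 	elif Hex_num == 11:
-- 		Hex_num = 'b'
-- 	elif Hex_num == 12:
-- 		Hex_num = 'c'
-- 	elif Hex_num == 13: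
-- 		Hex_num = 'd'
-- 	elif Hex_num == 14:
-- 		Hex_num = 'e'
-- 	elif Hex_num == 15:
-- 		Hex_num = 'f'
-- 	else:
-- 		Hex_num = str(Hex_num)
--
-- 	return Hex_num
-- ===== SOURCE B (Python) =====
-- def Hex_Dict(List):
--     assert len(List) < 5
--     value = 0
--     for b in List:
--         value = value * 2 + b
--     if 10 <= value <= 15:
--         return chr(ord('a') + value - 10)
--     return str(value)
-- ===== Notes on version B (the rewrite author's own statement) =====
-- stated objective: simpler
-- what changed: Replaces A's copy/reverse/pad-with-zeros/reverse phase and fixed 8/4/2/1 weighted sum plus a six-branch letter ladder with a single Horner fold (value = value*2 + b) and one arithmetic chr() lookup for 10..15.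
import Mathlib
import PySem

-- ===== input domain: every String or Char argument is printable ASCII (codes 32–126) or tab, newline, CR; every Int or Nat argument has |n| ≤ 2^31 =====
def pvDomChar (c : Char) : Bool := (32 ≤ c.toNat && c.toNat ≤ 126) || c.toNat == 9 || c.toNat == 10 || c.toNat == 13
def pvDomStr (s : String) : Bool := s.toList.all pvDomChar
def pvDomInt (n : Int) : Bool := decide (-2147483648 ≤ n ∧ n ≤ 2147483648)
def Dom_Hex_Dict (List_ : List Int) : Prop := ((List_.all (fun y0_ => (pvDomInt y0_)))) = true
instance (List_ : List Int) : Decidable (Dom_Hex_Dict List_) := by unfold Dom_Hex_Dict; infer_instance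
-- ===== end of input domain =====

-- B replaces A's copy/reverse/pad/reverse + fixed 8/4/2/1 weighted sum + six-branch letter
-- ladder with a single Horner fold and an arithmetic character lookup (objective: simpler).

-- ===== PORT A =====
-- 'while len(List) < 4: List.append(0)' — structural fuel recursion (the loop runs < 4 times)
def Hex_Dict_pad : Nat → List Int → List Int
  | 0, l => l
  | n + 1, l => if l.length < 4 then Hex_Dict_pad n (l ++ [0]) else l

def Hex_Dict (List_ : List Int) : String :=
  -- List = List[:]; assert len(List) < 5  (the assert is Pre_Hex_Dict)
  let l1 := List_.reverse
  let l2 := Hex_Dict_pad 4 l1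
  let l3 := l2.reverse
  -- indices 0..3 always exist after padding (length ≥ 4); .getD 0 is never the default under Pre_
  let hexNum : Int := 8 * (PySem.List.pyGet? l3 0).getD 0 + 4 * (PySem.List.pyGet? l3 1).getD 0
    + 2 * (PySem.List.pyGet? l3 2).getD 0 + 1 * (PySem.List.pyGet? l3 3).getD 0
  if hexNum = 10 then "a"
  else if hexNum = 11 then "b"
  else if hexNum = 12 then "c"
  else if hexNum = 13 then "d"
  else if hexNum = 14 then "e"
  else if hexNum = 15 then "f"
  else PySem.Int.toStr hexNum

-- ===== PORT B =====
def Hex_Dict_alt (List_ : List Int) : String :=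
  let value := List_.foldl (fun v b => v * 2 + b) 0
  if 10 ≤ value ∧ value ≤ 15 then String.ofList [Char.ofNat (97 + (value - 10)).toNat]
  else PySem.Int.toStr value

-- ===== PRECONDITION & SPEC =====
-- A's 'assert len(List) < 5' raises AssertionError on longer lists
def Pre_Hex_Dict (List_ : List Int) : Prop := List_.length < 5
instance (List_ : List Int) : Decidable (Pre_Hex_Dict List_) := by unfold Pre_Hex_Dict; infer_instance
def pvWitness_Hex_Dict : List Int := [1, 0, 1, 0]

def Spec_Hex_Dict (List_ : List Int) (out : String) : Prop := out = Hex_Dict_alt List_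
instance (List_ : List Int) (out : String) : Decidable (Spec_Hex_Dict List_ out) := by unfold Spec_Hex_Dict; infer_instance

-- ===== CLAIM (what is proved, stated in full; the proofs are below) =====
def Claim_equal_Hex_Dict : Prop := ∀ (List_ : List Int), Dom_Hex_Dict List_ → Pre_Hex_Dict List_ → Spec_Hex_Dict List_ (Hex_Dict List_)

-- ===== LEMMAS AND PROOFS =====

-- the two output mappings agree on every integer value
lemma Hex_Dict_map_eq (v : Int) :
    (if v = 10 then "a" else if v = 11 then "b" else if v = 12 then "c" else if v = 13 then "d"
      else if v = 14 then "e" else if v = 15 then "f" else PySem.Int.toStr v)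
    = (if 10 ≤ v ∧ v ≤ 15 then String.ofList [Char.ofNat (97 + (v - 10)).toNat] else PySem.Int.toStr v) := by
  by_cases h : 10 ≤ v ∧ v ≤ 15
  · have : v = 10 ∨ v = 11 ∨ v = 12 ∨ v = 13 ∨ v = 14 ∨ v = 15 := by omega
    rcases this with rfl | rfl | rfl | rfl | rfl | rfl <;> rfl
  · have h10 : v ≠ 10 := by omega
    have h11 : v ≠ 11 := by omega
    have h12 : v ≠ 12 := by omega
    have h13 : v ≠ 13 := by omega
    have h14 : v ≠ 14 := by omega
    have h15 : v ≠ 15 := by omega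
    simp [h, h10, h11, h12, h13, h14, h15]

-- ===== VERDICT (by name: the statement is the Claim_ definition above) =====
theorem Hex_Dict_spec : Claim_equal_Hex_Dict := by
  intro List_ _ hpre
  unfold Pre_Hex_Dict at hpre
  unfold Spec_Hex_Dict Hex_Dict Hex_Dict_alt
  match List_, hpre with
  | [], _ =>
      simp [Hex_Dict_pad, PySem.List.pyGet?, PySem.List.pyIdx?]
  | [a], _ =>
      simpa [Hex_Dict_pad, PySem.List.pyGet?, PySem.List.pyIdx?] using Hex_Dict_map_eq a
  | [a, b], _ =>
      have := Hex_Dict_map_eq (2 * a + b)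
      simp [Hex_Dict_pad, PySem.List.pyGet?, PySem.List.pyIdx?] at this ⊢
      convert this using 3 <;> ring_nf
  | [a, b, c], _ =>
      have := Hex_Dict_map_eq (4 * a + 2 * b + c)
      simp [Hex_Dict_pad, PySem.List.pyGet?, PySem.List.pyIdx?] at this ⊢
      convert this using 3 <;> ring_nf
  | [a, b, c, d], _ =>
      have := Hex_Dict_map_eq (8 * a + 4 * b + 2 * c + d)
      simp [Hex_Dict_pad, PySem.List.pyGet?, PySem.List.pyIdx?] at this ⊢
      convert this using 3 <;> ring_nf
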